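-- pv_equiv track=rewrite | github.com/Ingeniums/ingeneer-2k24-challenges | ai/Apocalypse/challenge/files/main.py | verify_submission
-- ===== SOURCE A (Python) =====
-- def verify_submission(submitted):
--     true = "1011011110110011110111000001011110001110"
--     ones_count = 0
--     zombie = False
--
--     if len(submitted) != len(true):
--         return False
--
--     for idx, value in enumerate(submitted):
--         if value not in ['0', '1']:
--             return False
--
--         if value == '1' and true[idx] == '1':
--             ones_count += 1
--
--         elif value == '1' and true[idx] != '1':
--             zombie = True
--             break
--
--     return ones_count >= 10 and not zombie
-- ===== SOURCE B (Python) =====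
-- def verify_submission(submitted):
--     TARGET = 0b1011011110110011110111000001011110001110  # = 788996560782
--     if len(submitted) != 40:
--         return False
--     s = 0
--     for c in submitted:
--         if c == '1':
--             s = 2 * s + 1
--         elif c == '0':
--             s = 2 * s
--         else:
--             return False
--     m = s & TARGET
--     return m == s and bin(m).count('1') >= 10
-- ===== Notes on version B (the rewrite author's own statement) =====
-- stated objective: alternative
-- what changed: B converts the submission to an integer bitset in one validating pass and replaces A's per-index compare / ones-counter / zombie-flag-with-break by bitwise operations against a precomputed integer target: the zombie check becomes (s & TARGET) == s and the matching-ones count becomes a popcount of s & TARGET.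
import Mathlib
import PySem

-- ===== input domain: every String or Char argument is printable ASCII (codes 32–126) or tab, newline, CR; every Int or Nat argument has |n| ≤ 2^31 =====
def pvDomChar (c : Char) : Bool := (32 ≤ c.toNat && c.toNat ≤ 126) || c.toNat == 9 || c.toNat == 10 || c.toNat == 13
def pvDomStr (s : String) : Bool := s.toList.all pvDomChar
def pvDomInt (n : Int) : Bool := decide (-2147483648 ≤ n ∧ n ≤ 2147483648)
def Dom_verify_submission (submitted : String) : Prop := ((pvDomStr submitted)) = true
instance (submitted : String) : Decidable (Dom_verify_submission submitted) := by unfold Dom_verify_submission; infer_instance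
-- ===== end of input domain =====

-- B re-implements the check as one validating pass building an integer bitset, then bitwise ops
-- against a precomputed integer target (alternative formulation; same O(n) cost as A).

-- ===== PORT A =====
-- the for-loop over enumerate(submitted); 'break' returns the final expression with zombie = True
def vsLoopA (t : String) : List (Int × Char) → Int → Bool
  | [], ones => decide (10 ≤ ones) && !false
  | (idx, value) :: rest, ones =>
    if ¬(value = '0' ∨ value = '1') then false
    else if value = '1' ∧ PySem.Str.pyGet? t idx = some '1' then vsLoopA t rest (ones + 1)
    else if value = '1' ∧ ¬(PySem.Str.pyGet? t idx = some '1') then decide (10 ≤ ones) && !true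
    else vsLoopA t rest ones

def verify_submission (submitted : String) : Bool :=
  let t := "1011011110110011110111000001011110001110"
  if PySem.Str.len submitted ≠ PySem.Str.len t then false
  else vsLoopA t (PySem.List.enumerate submitted.toList) 0

-- ===== PORT B =====
-- the validating conversion loop of Source B: s = 2*s+1 on '1', s = 2*s on '0', early False otherwise
def vsToBits? : List Char → Nat → Option Nat
  | [], s => some s
  | c :: cs, s =>
    if c = '1' then vsToBits? cs (2 * s + 1)
    else if c = '0' then vsToBits? cs (2 * s)
    else none

def verify_submission_alt (submitted : String) : Bool :=
  let TARGET : Nat := 788996560782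
  if PySem.Str.len submitted ≠ 40 then false
  else
    match vsToBits? submitted.toList 0 with
    | none => false
    | some s =>
      let m := s &&& TARGET
      -- bin(m).count('1') is ported as PySem.Int.bitCount (the popcount primitive)
      decide (m = s) && decide (10 ≤ PySem.Int.bitCount (m : Int))

-- ===== PRECONDITION & SPEC =====
def Spec_verify_submission (submitted : String) (out : Bool) : Prop := out = verify_submission_alt submitted
instance (submitted : String) (out : Bool) : Decidable (Spec_verify_submission submitted out) := by unfold Spec_verify_submission; infer_instance

-- ===== CLAIM (what is proved, stated in full; the proofs are below) =====
def Claim_equal_verify_submission : Prop := ∀ (submitted : String), Dom_verify_submission submitted → Spec_verify_submission submitted (verify_submission submitted)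

-- ===== LEMMAS AND PROOFS =====

-- the target string as a list of chars
def vsTL : List Char := ['1', '0', '1', '1', '0', '1', '1', '1', '1', '0', '1', '1', '0', '0', '1', '1', '1', '1', '0', '1', '1', '1', '0', '0', '0', '0', '0', '1', '0', '1', '1', '1', '1', '0', '0', '0', '1', '1', '1', '0']

set_option maxRecDepth 8192 in
lemma vsTL_str : "1011011110110011110111000001011110001110".toList = vsTL := rfl

def vsBit (c : Char) : Nat := if c = '1' then 1 else 0

-- LSB-first value of a bit-char list
def vsVal : List Char → Nat
  | [] => 0
  | c :: cs => vsBit c + 2 * vsVal cs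

def vsAndc (a b : Char) : Char := if a = '1' ∧ b = '1' then '1' else '0'

-- proof-side reformulation of A's loop over the zipped pair list
def vsLoopP : List (Char × Char) → Int → Bool
  | [], ones => decide (10 ≤ ones)
  | (v, tc) :: rest, ones =>
    if ¬(v = '0' ∨ v = '1') then false
    else if v = '1' ∧ tc = '1' then vsLoopP rest (ones + 1)
    else if v = '1' ∧ tc ≠ '1' then false
    else vsLoopP rest ones

lemma vsTL_len : vsTL.length = 40 := by decide

lemma vsTL_binB : (vsTL.all fun c => decide (c = '0' ∨ c = '1')) = true := rfl

lemma vsTL_bin : ∀ c ∈ vsTL, c = '0' ∨ c = '1' := by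
  have h := vsTL_binB
  rw [List.all_eq_true] at h
  intro c hc
  simpa using h c hc

lemma vsAndc_eq_iff (a b : Char) (ha : a = '0' ∨ a = '1') (hb : b = '0' ∨ b = '1') :
    vsAndc a b = a ↔ ¬(a = '1' ∧ b ≠ '1') := by
  rcases ha with rfl | rfl <;> rcases hb with rfl | rfl <;> decide

lemma vsAndc_count_iff (a b : Char) (ha : a = '0' ∨ a = '1') (hb : b = '0' ∨ b = '1') :
    (vsAndc a b == '1') = true ↔ (a = '1' ∧ b = '1') := by
  rcases ha with rfl | rfl <;> rcases hb with rfl | rfl <;> decide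

lemma vsBit_le_one (c : Char) : vsBit c ≤ 1 := by
  unfold vsBit; split <;> omega

lemma vsAndc_bin (a b : Char) : vsAndc a b = '0' ∨ vsAndc a b = '1' := by
  unfold vsAndc; split <;> simp

-- closed form of A's loop on the zipped list
lemma vsLoopP_char (ps : List (Char × Char)) (ones : Int) :
    vsLoopP ps ones =
      ((ps.all fun p => decide (p.1 = '0' ∨ p.1 = '1')) &&
       !(ps.any fun p => decide (p.1 = '1' ∧ p.2 ≠ '1')) &&
       decide (10 ≤ ones + ((ps.countP fun p => decide (p.1 = '1' ∧ p.2 = '1')) : Int))) := by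
  induction ps generalizing ones with
  | nil => simp [vsLoopP]
  | cons p rest ih =>
    obtain ⟨v, tc⟩ := p
    by_cases hv1 : v = '1'
    · subst hv1
      by_cases ht : tc = '1'
      · subst ht
        simp only [vsLoopP, List.all_cons, List.any_cons, List.countP_cons]
        simp [ih]
        congr 1
        rw [decide_eq_decide]
        omega
      · simp [vsLoopP, ht]
    · by_cases hv0 : v = '0'
      · subst hv0
        simp only [vsLoopP, List.all_cons, List.any_cons, List.countP_cons]
        simp [ih]
      · simp [vsLoopP, hv0, hv1]

-- bridge: A's loop over enumerate with string indexing equals the zipped loop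
lemma vsLoopA_bridge : ∀ (u : List Char) (k : Nat) (ones : Int), u.length + k ≤ 40 →
    vsLoopA "1011011110110011110111000001011110001110" (PySem.List.enumerate u (k : Int)) ones
      = vsLoopP (u.zip (vsTL.drop k)) ones := by
  intro u
  induction u with
  | nil => intro k ones _; simp [vsLoopA, vsLoopP, PySem.List.enumerate]
  | cons c cs ih =>
    intro k ones h
    have hk : k < 40 := by simp only [List.length_cons] at h; omega
    have hkTL : k < vsTL.length := by rw [vsTL_len]; omega
    have hget : PySem.Str.pyGet? "1011011110110011110111000001011110001110" (k : Int)
        = some vsTL[k] := by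
      rw [PySem.Str.pyGet?_natCast, vsTL_str]
      exact List.getElem?_eq_getElem hkTL
    have hdrop : vsTL.drop k = vsTL[k] :: vsTL.drop (k + 1) := List.drop_eq_getElem_cons hkTL
    have hcast : ((k : Int) + 1) = ((k + 1 : Nat) : Int) := by push_cast; ring
    rw [PySem.List.enumerate_cons, hdrop, List.zip_cons_cons]
    show (if ¬(c = '0' ∨ c = '1') then false
      else if c = '1' ∧ PySem.Str.pyGet? _ (k : Int) = some '1' then
        vsLoopA _ (PySem.List.enumerate cs ((k : Int) + 1)) (ones + 1)
      else if c = '1' ∧ ¬(PySem.Str.pyGet? _ (k : Int) = some '1') then decide (10 ≤ ones) && !true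
      else vsLoopA _ (PySem.List.enumerate cs ((k : Int) + 1)) ones) = _
    rw [hget, hcast]
    have hrec : ∀ o : Int, vsLoopA "1011011110110011110111000001011110001110"
        (PySem.List.enumerate cs ((k + 1 : Nat) : Int)) o = vsLoopP (cs.zip (vsTL.drop (k + 1))) o := by
      intro o
      apply ih
      simp only [List.length_cons] at h
      omega
    simp only [vsLoopP, Option.some.injEq, hrec, ne_eq, Bool.not_true, Bool.and_false]

-- B's conversion loop: failure and success characterisation
lemma vsToBits?_none : ∀ (u : List Char) (s : Nat), (¬ ∀ c ∈ u, c = '0' ∨ c = '1') →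
    vsToBits? u s = none := by
  intro u
  induction u with
  | nil => intro s h; exact absurd (by simp) h
  | cons c cs ih =>
    intro s h
    by_cases hc : c = '0' ∨ c = '1'
    · have hcs : ¬ ∀ x ∈ cs, x = '0' ∨ x = '1' := by
        intro hall
        apply h
        intro x hx
        rcases List.mem_cons.mp hx with rfl | hx'
        · exact hc
        · exact hall x hx'
      rcases hc with hc | hc <;> subst hc <;> simp [vsToBits?, ih _ hcs]
    · push_neg at hc
      simp [vsToBits?, hc.1, hc.2]

lemma vsVal_append (xs : List Char) (c : Char) :
    vsVal (xs ++ [c]) = vsVal xs + vsBit c * 2 ^ xs.length := by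
  induction xs with
  | nil => simp [vsVal]
  | cons d ds ih => simp [vsVal, ih]; ring

lemma vsToBits?_some : ∀ (u : List Char) (s : Nat), (∀ c ∈ u, c = '0' ∨ c = '1') →
    vsToBits? u s = some (s * 2 ^ u.length + vsVal u.reverse) := by
  intro u
  induction u with
  | nil => intro s _; simp [vsToBits?, vsVal]
  | cons c cs ih =>
    intro s h
    have hcs : ∀ x ∈ cs, x = '0' ∨ x = '1' := fun x hx => h x (List.mem_cons_of_mem _ hx)
    have hlen : cs.reverse.length = cs.length := List.length_reverse
    rcases h c List.mem_cons_self with hc | hc <;> subst hc <;>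
      simp [vsToBits?, ih _ hcs, List.reverse_cons, vsVal_append, vsBit, hlen,
        List.length_cons, pow_succ] <;> ring

-- one binary digit of a Nat &&&
lemma vsLandBit (b1 b2 a c : Nat) (h1 : b1 ≤ 1) (h2 : b2 ≤ 1) :
    (b1 + 2 * a) &&& (b2 + 2 * c) = (b1 &&& b2) + 2 * (a &&& c) := by
  have hbb : b1 &&& b2 ≤ 1 := by interval_cases b1 <;> interval_cases b2 <;> decide
  apply Nat.eq_of_testBit_eq
  intro i
  cases i with
  | zero =>
    rw [Nat.testBit_and, Nat.testBit_zero, Nat.testBit_zero, Nat.testBit_zero]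
    have e1 : (b1 + 2 * a) % 2 = b1 := by omega
    have e2 : (b2 + 2 * c) % 2 = b2 := by omega
    have e3 : ((b1 &&& b2) + 2 * (a &&& c)) % 2 = (b1 &&& b2) := by omega
    rw [e1, e2, e3]
    interval_cases b1 <;> interval_cases b2 <;> decide
  | succ i =>
    rw [Nat.testBit_and, Nat.testBit_add_one, Nat.testBit_add_one, Nat.testBit_add_one]
    have e1 : (b1 + 2 * a) / 2 = a := by omega
    have e2 : (b2 + 2 * c) / 2 = c := by omega
    have e3 : ((b1 &&& b2) + 2 * (a &&& c)) / 2 = (a &&& c) := by omega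
    rw [e1, e2, e3, Nat.testBit_and]

lemma vsBit_and (a b : Char) (ha : a = '0' ∨ a = '1') (hb : b = '0' ∨ b = '1') :
    vsBit a &&& vsBit b = vsBit (vsAndc a b) := by
  rcases ha with ha | ha <;> rcases hb with hb | hb <;> subst ha <;> subst hb <;> decide

lemma vsVal_land : ∀ (u v : List Char), u.length = v.length →
    (∀ c ∈ u, c = '0' ∨ c = '1') → (∀ c ∈ v, c = '0' ∨ c = '1') →
    vsVal u &&& vsVal v = vsVal (List.zipWith vsAndc u v) := by
  intro u
  induction u with
  | nil =>
    intro v hlen _ _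
    have : v = [] := List.eq_nil_of_length_eq_zero hlen.symm
    subst this; rfl
  | cons c cs ih =>
    intro v hlen hu hv
    cases v with
    | nil => simp at hlen
    | cons d ds =>
      have hlen' : cs.length = ds.length := by simpa using hlen
      have h1 := hu c List.mem_cons_self
      have h2 := hv d List.mem_cons_self
      have hcs : ∀ x ∈ cs, x = '0' ∨ x = '1' := fun x hx => hu x (List.mem_cons_of_mem _ hx)
      have hds : ∀ x ∈ ds, x = '0' ∨ x = '1' := fun x hx => hv x (List.mem_cons_of_mem _ hx)
      show (vsBit c + 2 * vsVal cs) &&& (vsBit d + 2 * vsVal ds) = _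
      rw [vsLandBit _ _ _ _ (vsBit_le_one c) (vsBit_le_one d), vsBit_and c d h1 h2,
        ih ds hlen' hcs hds]
      rfl

lemma vsVal_inj : ∀ (u v : List Char), u.length = v.length →
    (∀ c ∈ u, c = '0' ∨ c = '1') → (∀ c ∈ v, c = '0' ∨ c = '1') →
    vsVal u = vsVal v → u = v := by
  intro u
  induction u with
  | nil =>
    intro v hlen _ _ _
    exact (List.eq_nil_of_length_eq_zero hlen.symm).symm
  | cons c cs ih =>
    intro v hlen hu hv he
    cases v with
    | nil => simp at hlen
    | cons d ds =>
      have hlen' : cs.length = ds.length := by simpa using hlen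
      have h1 := hu c List.mem_cons_self
      have h2 := hv d List.mem_cons_self
      have hcs : ∀ x ∈ cs, x = '0' ∨ x = '1' := fun x hx => hu x (List.mem_cons_of_mem _ hx)
      have hds : ∀ x ∈ ds, x = '0' ∨ x = '1' := fun x hx => hv x (List.mem_cons_of_mem _ hx)
      have he' : vsBit c + 2 * vsVal cs = vsBit d + 2 * vsVal ds := he
      have hb1 := vsBit_le_one c
      have hb2 := vsBit_le_one d
      have hbeq : vsBit c = vsBit d ∧ vsVal cs = vsVal ds := by omega
      have hbit : vsBit c = vsBit d := hbeq.1
      have hcd : c = d := by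
        rcases h1 with rfl | rfl <;> rcases h2 with rfl | rfl <;>
          first | rfl | simp [vsBit] at hbit
      rw [hcd, ih ds hlen' hcs hds hbeq.2]

lemma vsBitCount_step (b a : Nat) (hb : b ≤ 1) :
    PySem.Int.bitCount ((b + 2 * a : Nat) : Int) = b + PySem.Int.bitCount (a : Int) := by
  by_cases h0 : b + 2 * a = 0
  · have hb0 : b = 0 := by omega
    have ha0 : a = 0 := by omega
    subst hb0; subst ha0
    simp
  · have hpos : 0 < b + 2 * a := by omega
    rw [PySem.Int.bitCount_natCast hpos]
    have e1 : (b + 2 * a) % 2 = b := by omega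
    have e2 : (b + 2 * a) / 2 = a := by omega
    rw [e1, e2]

lemma vsBitCount_val : ∀ (w : List Char), (∀ c ∈ w, c = '0' ∨ c = '1') →
    PySem.Int.bitCount ((vsVal w : Nat) : Int) = w.count '1' := by
  intro w
  induction w with
  | nil => simp [vsVal]
  | cons c cs ih =>
    intro h
    have hcs : ∀ x ∈ cs, x = '0' ∨ x = '1' := fun x hx => h x (List.mem_cons_of_mem _ hx)
    show PySem.Int.bitCount ((vsBit c + 2 * vsVal cs : Nat) : Int) = _
    rw [vsBitCount_step _ _ (vsBit_le_one c), ih hcs]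
    rcases h c List.mem_cons_self with hc | hc <;> subst hc
    · simp [vsBit]
    · simp [vsBit]
      omega

-- ===== VERDICT (by name: the statement is the Claim_ definition above) =====
set_option maxRecDepth 8192 in
theorem verify_submission_spec : Claim_equal_verify_submission := by
  intro submitted _
  unfold Spec_verify_submission verify_submission verify_submission_alt
  dsimp only
  have hlen40 : PySem.Str.len "1011011110110011110111000001011110001110" = (40 : Int) := by decide
  rw [hlen40, PySem.Str.len_eq]
  set u := submitted.toList with hu
  by_cases hl : u.length = 40
  · -- length matches
    have hne : ¬((u.length : Int) ≠ (40 : Int)) := by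
      push_neg; exact_mod_cast hl
    rw [if_neg hne, if_neg hne]
    -- A side: bridge to the zipped loop and take its closed form
    have hA : vsLoopA "1011011110110011110111000001011110001110" (PySem.List.enumerate u) 0
        = vsLoopP (u.zip vsTL) 0 := by
      have := vsLoopA_bridge u 0 0 (by omega)
      simpa using this
    rw [hA, vsLoopP_char]
    by_cases hbin : ∀ c ∈ u, c = '0' ∨ c = '1'
    · -- binary input
      have hall : (u.zip vsTL).all (fun p => decide (p.1 = '0' ∨ p.1 = '1')) = true := by
        rw [List.all_eq_true]
        intro p hp
        exact decide_eq_true ((hbin p.1 (List.of_mem_zip hp).1))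
      rw [vsToBits?_some u 0 hbin]
      simp only [zero_mul, zero_add]
      set s := vsVal u.reverse with hs
      -- the target's value
      have hT : (788996560782 : Nat) = vsVal vsTL.reverse := by decide
      have hurlen : u.reverse.length = 40 := by rw [List.length_reverse]; exact hl
      have htrlen : vsTL.reverse.length = 40 := by rw [List.length_reverse]; exact vsTL_len
      have hurbin : ∀ c ∈ u.reverse, c = '0' ∨ c = '1' := by
        intro c hc; exact hbin c (List.mem_reverse.mp hc)
      have htrbin : ∀ c ∈ vsTL.reverse, c = '0' ∨ c = '1' := by
        intro c hc; exact vsTL_bin c (List.mem_reverse.mp hc)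
      have hzlen : u.length = vsTL.length := hl.trans vsTL_len.symm
      have hm : s &&& 788996560782 = vsVal ((List.zipWith vsAndc u vsTL).reverse) := by
        rw [hT, hs, vsVal_land u.reverse vsTL.reverse (hurlen.trans htrlen.symm) hurbin htrbin,
          List.reverse_zipWith hzlen]
      have hzip_map : List.zipWith vsAndc u vsTL = (u.zip vsTL).map (fun p => vsAndc p.1 p.2) := by
        rw [← List.map_uncurry_zip_eq_zipWith]; rfl
      have hzbin : ∀ c ∈ (List.zipWith vsAndc u vsTL).reverse, c = '0' ∨ c = '1' := by
        intro c hc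
        rw [List.mem_reverse, hzip_map] at hc
        obtain ⟨p, -, hpc⟩ := List.mem_map.mp hc
        rw [← hpc]; exact vsAndc_bin p.1 p.2
      have hzlen2 : (List.zipWith vsAndc u vsTL).reverse.length = 40 := by
        simp [List.length_zipWith, hl, vsTL_len]
      -- m = s ↔ no zombie position
      have hfst : (u.zip vsTL).map Prod.fst = u := List.map_fst_zip (le_of_eq hzlen)
      have hms : (s &&& 788996560782 = s) ↔ List.zipWith vsAndc u vsTL = u := by
        constructor
        · intro h
          rw [hm] at h
          have := vsVal_inj _ _ (hzlen2.trans hurlen.symm) hzbin hurbin h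
          exact List.reverse_injective this
        · intro h
          rw [hm, h]
      have hmap_iff : List.zipWith vsAndc u vsTL = u ↔
          ∀ p ∈ u.zip vsTL, ¬(p.1 = '1' ∧ p.2 ≠ '1') := by
        rw [hzip_map]
        constructor
        · intro h p hp
          have hpt : vsAndc p.1 p.2 = p.1 := by
            simpa using List.map_eq_map_iff.mp (h.trans hfst.symm) p hp
          have hv := hbin p.1 (List.of_mem_zip hp).1
          have ht := vsTL_bin p.2 (List.of_mem_zip hp).2
          exact (vsAndc_eq_iff p.1 p.2 hv ht).mp hpt
        · intro h
          refine (List.map_eq_map_iff.mpr ?_).trans hfst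
          intro p hp
          show vsAndc p.1 p.2 = p.1
          have hv := hbin p.1 (List.of_mem_zip hp).1
          have ht := vsTL_bin p.2 (List.of_mem_zip hp).2
          exact (vsAndc_eq_iff p.1 p.2 hv ht).mpr (h p hp)
      -- popcount of m = matched-ones count
      have hcnt : PySem.Int.bitCount ((s &&& 788996560782 : Nat) : Int)
          = (u.zip vsTL).countP (fun p => decide (p.1 = '1' ∧ p.2 = '1')) := by
        rw [hm, vsBitCount_val _ hzbin, List.count_reverse, hzip_map, List.count_eq_countP,
          List.countP_map]
        apply List.countP_congr
        intro p hp
        have hv := hbin p.1 (List.of_mem_zip hp).1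
        have ht := vsTL_bin p.2 (List.of_mem_zip hp).2
        simpa using vsAndc_count_iff p.1 p.2 hv ht
      by_cases hzom : s &&& 788996560782 = s
      · have hnoz : ((u.zip vsTL).any fun p => decide (p.1 = '1' ∧ p.2 ≠ '1')) = false := by
          rw [List.any_eq_false]
          intro p hp
          simpa using (hmap_iff.mp (hms.mp hzom)) p hp
        rw [hall, hnoz]
        simp only [Bool.true_and, Bool.not_false, Bool.true_and]
        have h1 : decide (s &&& 788996560782 = s) = true := decide_eq_true hzom
        rw [h1, Bool.true_and, decide_eq_decide, hcnt]
        omega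
      · have hyes : ((u.zip vsTL).any fun p => decide (p.1 = '1' ∧ p.2 ≠ '1')) = true := by
          by_contra hfalse
          apply hzom
          apply hms.mpr
          apply hmap_iff.mpr
          intro p hp
          rw [Bool.not_eq_true, List.any_eq_false] at hfalse
          simpa using hfalse p hp
        rw [hyes]
        simp [hzom]
    · -- an invalid character: both sides false
      rw [vsToBits?_none u 0 hbin]
      have : (u.zip vsTL).all (fun p => decide (p.1 = '0' ∨ p.1 = '1')) = false := by
        rw [List.all_eq_false]
        push_neg at hbin
        obtain ⟨c, hc, hval⟩ := hbin
        have hcin : ∃ d, (c, d) ∈ u.zip vsTL := by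
          obtain ⟨i, hi, hci⟩ := List.mem_iff_getElem.mp hc
          have hi' : i < vsTL.length := by rw [vsTL_len]; omega
          refine ⟨vsTL[i], ?_⟩
          rw [List.mem_iff_getElem]
          exact ⟨i, by rw [List.length_zip, hl, vsTL_len]; omega, by simp [hci]⟩
        obtain ⟨d, hd⟩ := hcin
        exact ⟨(c, d), hd, by simpa using hval⟩
      rw [this]
      simp
  · -- length mismatch: both take the guard branch
    have hne : ((u.length : Int) ≠ (40 : Int)) := by
      intro h; exact hl (by exact_mod_cast h)
    rw [if_pos hne, if_pos hne]
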